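-- pv_equiv track=rewrite | github.com/LSe-Yeong/Backjoon | python/구현/외벽 점검.py | solution
-- ===== SOURCE A (Python) =====
-- from itertools import permutations
--
-- def solution(n, weaks, dist):
--     weak = []
--     for v in weaks:
--         weak.append(v)
--     for v in weaks:
--         weak.append(v+n)
--     prob = list(permutations(dist,len(dist)))
--     answer = len(dist) + 1
--     for p in prob:
--         for start in range(len(weak)//2):
--             count = 1
--             posible = weak[start] + p[count-1]
--             for idx in range(start,start+len(weak)//2):
--                 if posible < weak[idx]:
--                     count+=1
--                     if count > len(dist):
--                         break
--                     posible = weak[idx] + p[count-1]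
--             answer = min(answer,count)
--
--     return answer
-- ===== SOURCE B (Python) =====
-- from itertools import permutations
--
-- def _covers(doubled, m, start, p):
--     count = 1
--     reach = doubled[start] + p[0]
--     for idx in range(start, start + m):
--         if reach < doubled[idx]:
--             count += 1
--             if count > len(p):
--                 return False
--             reach = doubled[idx] + p[count - 1]
--     return True
--
-- def solution(n, weaks, dist):
--     m = len(weaks)
--     doubled = weaks + [w + n for w in weaks]
--     for k in range(1, len(dist) + 1):
--         for p in permutations(dist, k):
--             for start in range(m):
--                 if _covers(doubled, m, start, p):
--                     return k
--     return len(dist) + 1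
-- ===== Notes on version B (the rewrite author's own statement) =====
-- stated objective: alternative
-- what changed: A enumerates every full permutation of dist and minimizes the greedy inspector count; B searches k = 1,2,... upward, testing k-permutations from each start and returning the first k that covers, exiting early.
import Mathlib
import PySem

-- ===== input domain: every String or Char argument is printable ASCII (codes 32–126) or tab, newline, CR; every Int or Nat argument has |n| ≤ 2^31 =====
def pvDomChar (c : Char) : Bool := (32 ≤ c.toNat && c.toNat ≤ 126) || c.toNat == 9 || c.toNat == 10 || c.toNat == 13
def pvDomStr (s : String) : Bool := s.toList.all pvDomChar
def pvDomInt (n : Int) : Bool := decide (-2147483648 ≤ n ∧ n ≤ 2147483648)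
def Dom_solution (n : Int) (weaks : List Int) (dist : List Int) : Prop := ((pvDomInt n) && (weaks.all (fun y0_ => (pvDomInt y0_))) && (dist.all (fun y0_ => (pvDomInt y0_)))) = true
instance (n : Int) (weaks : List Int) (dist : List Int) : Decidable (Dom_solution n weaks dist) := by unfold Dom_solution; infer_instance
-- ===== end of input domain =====

-- B replaces A's "minimum count over all full permutations" by an ascending search:
-- try k = 1, 2, … inspectors, testing every k-permutation and start, and return the
-- first k that covers (objective: alternative search strategy with early exit).

-- ===== PORT A =====
-- itertools.permutations(pool, r) in itertools' order (pick index i, then recurse on the pool without i)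
def pvPerms (r : Nat) (xs : List Int) : List (List Int) :=
  match r with
  | 0 => [[]]
  | r+1 => (List.range xs.length).flatMap
      (fun i => (pvPerms r (xs.eraseIdx i)).map (fun t => xs.getD i 0 :: t))

-- A's inner greedy loop (idx over range(start, start+len(weak)//2)); all list indices
-- are nonnegative and in range under Pre_solution, so getD is exact there
def pvGreedyA (weak p : List Int) (K : Nat) : List Nat → Nat → Int → Nat
  | [], count, _ => count
  | idx :: rest, count, pos =>
      if pos < weak.getD idx 0 then
        if count + 1 > K then count + 1
        else pvGreedyA weak p K rest (count + 1) (weak.getD idx 0 + p.getD (count + 1 - 1) 0)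
      else pvGreedyA weak p K rest count pos

def solution (n : Int) (weaks : List Int) (dist : List Int) : Int :=
  let weak := weaks ++ weaks.map (fun v => v + n)
  let prob := pvPerms dist.length dist
  let answer : Nat :=
    prob.foldl (fun answer p =>
      (List.range (weak.length / 2)).foldl (fun answer start =>
        min answer (pvGreedyA weak p dist.length (List.range' start (weak.length / 2)) 1
          (weak.getD start 0 + p.getD 0 0))) answer)
      (dist.length + 1)
  (answer : Int)

-- ===== PORT B =====
-- B's coverage check for one start and one tuple p of k distances (cap = len(p))
def pvCoversLoop (doubled p : List Int) (K : Nat) : List Nat → Nat → Int → Bool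
  | [], _, _ => true
  | idx :: rest, count, reach =>
      if reach < doubled.getD idx 0 then
        if count + 1 > K then false
        else pvCoversLoop doubled p K rest (count + 1) (doubled.getD idx 0 + p.getD (count + 1 - 1) 0)
      else pvCoversLoop doubled p K rest count reach

def pvCovers (doubled : List Int) (m : Nat) (start : Nat) (p : List Int) : Bool :=
  pvCoversLoop doubled p p.length (List.range' start m) 1 (doubled.getD start 0 + p.getD 0 0)

def solution_alt (n : Int) (weaks : List Int) (dist : List Int) : Int :=
  let m := weaks.length
  let doubled := weaks ++ weaks.map (fun w => w + n)
  match (List.range' 1 dist.length).find? (fun k =>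
      (pvPerms k dist).any (fun p =>
        (List.range m).any (fun start => pvCovers doubled m start p))) with
  | some k => (k : Int)
  | none => (dist.length : Int) + 1

-- ===== PRECONDITION & SPEC =====
-- A raises IndexError (p[0] on an empty permutation tuple) exactly when dist = [] and weaks ≠ []; those inputs are excluded.
def Pre_solution (n : Int) (weaks : List Int) (dist : List Int) : Prop :=
  dist = [] → weaks = []
instance (n : Int) (weaks : List Int) (dist : List Int) : Decidable (Pre_solution n weaks dist) := by unfold Pre_solution; infer_instance

def pvWitness_solution : Int × List Int × List Int := (10, [1, 5, 6], [1, 2, 3])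

def Spec_solution (n : Int) (weaks : List Int) (dist : List Int) (out : Int) : Prop := out = solution_alt n weaks dist
instance (n : Int) (weaks : List Int) (dist : List Int) (out : Int) : Decidable (Spec_solution n weaks dist out) := by unfold Spec_solution; infer_instance

-- ===== CLAIM (what is proved, stated in full; the proofs are below) =====
def Claim_equal_solution : Prop := ∀ (n : Int) (weaks : List Int) (dist : List Int), Dom_solution n weaks dist → Pre_solution n weaks dist → Spec_solution n weaks dist (solution n weaks dist)

-- ===== LEMMAS AND PROOFS =====

-- the final count of A's greedy never drops below the running count
theorem pvGreedyA_ge (w p : List Int) (K : Nat) :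
    ∀ (idxs : List Nat) (count : Nat) (pos : Int), count ≤ pvGreedyA w p K idxs count pos := by
  intro idxs
  induction idxs with
  | nil => intro count pos; simp [pvGreedyA]
  | cons idx rest ih =>
    intro count pos
    simp only [pvGreedyA]
    split_ifs with h1 h2
    · omega
    · exact le_trans (by omega) (ih (count + 1) _)
    · exact ih count pos

theorem getD_take (l : List Int) (k i : Nat) (h : i < k) :
    (l.take k).getD i 0 = l.getD i 0 := by
  simp [List.getD_eq_getElem?_getD, h]

-- B's coverage test on the k-prefix decides whether A's greedy uses ≤ k inspectors
theorem covers_iff (w P : List Int) (k : Nat) (hkK : k ≤ P.length) :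
    ∀ (idxs : List Nat) (count : Nat) (pos : Int), count ≤ k →
      (pvCoversLoop w (P.take k) k idxs count pos = true ↔
        pvGreedyA w P P.length idxs count pos ≤ k) := by
  intro idxs
  induction idxs with
  | nil => intro count pos hc; simpa [pvCoversLoop, pvGreedyA]
  | cons idx rest ih =>
    intro count pos hc
    simp only [pvCoversLoop, pvGreedyA]
    split_ifs with h1 h2 h3 h4
    · -- count+1 > k, count+1 > P.length : covers false, greedy = count+1 > k
      simp only [false_iff, not_le]; omega
    · -- count+1 > k, count+1 ≤ P.length : covers false, greedy recursion ≥ count+1 > k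
      have := pvGreedyA_ge w P P.length rest (count + 1)
        (w.getD idx 0 + P.getD (count + 1 - 1) 0)
      simp only [false_iff, not_le]; omega
    · -- count+1 ≤ k but count+1 > P.length : impossible since k ≤ P.length
      exact absurd h4 (by omega)
    · -- count+1 ≤ k ≤ P.length : both recurse with equal state
      rw [getD_take P k (count + 1 - 1) (by omega)]
      exact ih (count + 1) _ (by omega)
    · exact ih count pos hc

theorem perms_length_mem {p : List Int} {r : Nat} {xs : List Int} (h : p ∈ pvPerms r xs) :
    p.length = r := by
  induction r generalizing xs p with
  | zero => simp [pvPerms] at h; simp [h]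
  | succ r ih =>
    simp only [pvPerms, List.mem_flatMap, List.mem_map, List.mem_range] at h
    obtain ⟨i, _, t, ht, rfl⟩ := h
    simp [ih ht]

theorem perms_take {P : List Int} {r : Nat} {xs : List Int} (h : P ∈ pvPerms r xs) :
    ∀ j, j ≤ r → P.take j ∈ pvPerms j xs := by
  induction r generalizing xs P with
  | zero =>
    intro j hj
    interval_cases j
    have : P = [] := by simpa [pvPerms] using h
    simp [this, pvPerms]
  | succ r ih =>
    intro j hj
    cases j with
    | zero => simp [pvPerms]
    | succ j =>
      simp only [pvPerms, List.mem_flatMap, List.mem_map, List.mem_range] at h ⊢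
      obtain ⟨i, hi, t, ht, rfl⟩ := h
      exact ⟨i, hi, t.take j, ih ht j (by omega), by simp⟩

theorem perms_exists {r : Nat} {xs : List Int} (h : r ≤ xs.length) :
    ∃ P, P ∈ pvPerms r xs := by
  induction r generalizing xs with
  | zero => exact ⟨[], by simp [pvPerms]⟩
  | succ r ih =>
    have hlen : (xs.eraseIdx 0).length = xs.length - 1 := by
      rw [List.length_eraseIdx]; split <;> omega
    have hr' : r ≤ (xs.eraseIdx 0).length := by rw [hlen]; omega
    obtain ⟨t, ht⟩ := ih hr'
    refine ⟨xs.getD 0 0 :: t, ?_⟩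
    simp only [pvPerms, List.mem_flatMap, List.mem_map, List.mem_range]
    exact ⟨0, by omega, t, ht, rfl⟩

theorem perms_extend {p : List Int} {j : Nat} {xs : List Int} (h : p ∈ pvPerms j xs) :
    ∀ r, j ≤ r → r ≤ xs.length → ∃ P ∈ pvPerms r xs, P.take j = p := by
  induction j generalizing xs p with
  | zero =>
    intro r _ hr
    obtain ⟨P, hP⟩ := perms_exists hr
    have : p = [] := by simpa [pvPerms] using h
    exact ⟨P, hP, by simp [this]⟩
  | succ j ih =>
    intro r hjr hr
    cases r with
    | zero => omega
    | succ r =>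
      simp only [pvPerms, List.mem_flatMap, List.mem_map, List.mem_range] at h
      obtain ⟨i, hi, t, ht, rfl⟩ := h
      have hlen : (xs.eraseIdx i).length = xs.length - 1 := by
        rw [List.length_eraseIdx]; split <;> omega
      obtain ⟨T, hT, hTt⟩ := ih ht r (by omega) (by omega)
      refine ⟨xs.getD i 0 :: T, ?_, by simp [hTt]⟩
      simp only [pvPerms, List.mem_flatMap, List.mem_map, List.mem_range]
      exact ⟨i, hi, T, hT, rfl⟩

-- ---- foldl-min machinery ----
def fmin {α : Type} (g : α → Nat) (a : Nat) (l : List α) : Nat :=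
  l.foldl (fun x y => min x (g y)) a

theorem fmin_le_init {α : Type} (g : α → Nat) (l : List α) :
    ∀ a, fmin g a l ≤ a := by
  induction l with
  | nil => intro a; simp [fmin]
  | cons x t ih =>
    intro a
    have h := ih (min a (g x))
    simp only [fmin, List.foldl] at h ⊢
    omega

theorem fmin_le_mem {α : Type} (g : α → Nat) {l : List α} {x : α} (hx : x ∈ l) :
    ∀ a, fmin g a l ≤ g x := by
  induction l with
  | nil => cases hx
  | cons y t ih =>
    intro a
    rcases List.mem_cons.mp hx with rfl | hx'
    · have h := fmin_le_init g t (min a (g x))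
      simp only [fmin, List.foldl] at h ⊢
      omega
    · exact ih hx' (min a (g y))

theorem fmin_cases {α : Type} (g : α → Nat) (l : List α) :
    ∀ a, fmin g a l = a ∨ ∃ x ∈ l, fmin g a l = g x := by
  induction l with
  | nil => intro a; left; rfl
  | cons y t ih =>
    intro a
    have hstep : fmin g a (y :: t) = fmin g (min a (g y)) t := rfl
    rcases ih (min a (g y)) with h | ⟨x, hx, h⟩
    · rcases le_total a (g y) with hm | hm
      · left; rw [hstep, h, min_eq_left hm]
      · right; exact ⟨y, by simp, by rw [hstep, h, min_eq_right hm]⟩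
    · right; exact ⟨x, List.mem_cons_of_mem _ hx, by rw [hstep, h]⟩

theorem fmin_append {α : Type} (g : α → Nat) (a : Nat) (u v : List α) :
    fmin g a (u ++ v) = fmin g (fmin g a u) v := by
  simp [fmin, List.foldl_append]

theorem fold_nested {α β : Type} (g : α → β → Nat) (l2 : List β) :
    ∀ (l1 : List α) (init : Nat),
      l1.foldl (fun a x => l2.foldl (fun a' y => min a' (g x y)) a) init =
      fmin (fun q : α × β => g q.1 q.2) init
        (l1.flatMap (fun x => l2.map (fun y => (x, y)))) := by
  intro l1
  induction l1 with
  | nil => intro init; rfl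
  | cons x t ih =>
    intro init
    simp only [List.foldl, List.flatMap_cons]
    rw [ih, fmin_append]
    congr 1
    simp [fmin, List.foldl_map]

-- ---- the two searches, abstracted ----
def pvG (w : List Int) (N m : Nat) (q : List Int × Nat) : Nat :=
  pvGreedyA w q.1 N (List.range' q.2 m) 1 (w.getD q.2 0 + q.1.getD 0 0)

def pvPairs (N m : Nat) (dist : List Int) : List (List Int × Nat) :=
  (pvPerms N dist).flatMap (fun p => (List.range m).map (fun s => (p, s)))

theorem solution_as_fmin (n : Int) (weaks dist : List Int) :
    solution n weaks dist =
      ((fmin (pvG (weaks ++ weaks.map (fun v => v + n)) dist.length weaks.length)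
        (dist.length + 1) (pvPairs dist.length weaks.length dist) : Nat) : Int) := by
  have hw2 : (weaks ++ weaks.map (fun v => v + n)).length / 2 = weaks.length := by
    simp; omega
  simp only [solution, hw2]
  rw [fold_nested]
  rfl

-- pvG q ≥ 1 always
theorem pvG_pos (w : List Int) (N m : Nat) (q : List Int × Nat) : 1 ≤ pvG w N m q :=
  pvGreedyA_ge _ _ _ _ _ _

-- a pair with greedy count ≤ k exists iff some k-permutation covers from some start
theorem exists_pair_iff (w : List Int) (m : Nat) (dist : List Int) (k : Nat)
    (hk1 : 1 ≤ k) (hk2 : k ≤ dist.length) :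
    (∃ q ∈ pvPairs dist.length m dist, pvG w dist.length m q ≤ k) ↔
    (∃ p ∈ pvPerms k dist, ∃ s, s < m ∧ pvCovers w m s p = true) := by
  constructor
  · rintro ⟨q, hq, hg⟩
    simp only [pvPairs, List.mem_flatMap, List.mem_map, List.mem_range] at hq
    obtain ⟨P, hP0, s, hs0, rfl⟩ := hq
    have hlenP : P.length = dist.length := perms_length_mem hP0
    have hlt : (P.take k).length = k := by simp [hlenP]; omega
    refine ⟨P.take k, perms_take hP0 k (by omega), s, hs0, ?_⟩
    unfold pvCovers
    rw [hlt, getD_take P k 0 (by omega)]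
    refine (covers_iff w P k (by omega) (List.range' s m) 1 _ hk1).mpr ?_
    rw [hlenP]
    exact hg
  · rintro ⟨p, hp, s, hs, hcov⟩
    have hlenp : p.length = k := perms_length_mem hp
    obtain ⟨P, hP, hPk⟩ := perms_extend hp dist.length hk2 le_rfl
    have hlenP : P.length = dist.length := perms_length_mem hP
    refine ⟨(P, s), ?_, ?_⟩
    · simp only [pvPairs, List.mem_flatMap, List.mem_map, List.mem_range, Prod.mk.injEq]
      exact ⟨P, hP, s, hs, rfl, rfl⟩
    · unfold pvG
      rw [← hlenP]
      subst hPk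
      unfold pvCovers at hcov
      have hlt : (P.take k).length = k := hlenp
      rw [hlt, getD_take P k 0 (by omega)] at hcov
      exact (covers_iff w P k (by omega) (List.range' s m) 1 _ hk1).mp hcov

-- ===== VERDICT (by name: the statement is the Claim_ definition above) =====
theorem solution_spec : Claim_equal_solution := by
  unfold Claim_equal_solution
  intro n weaks dist _ hpre
  unfold Pre_solution at hpre
  unfold Spec_solution
  rw [solution_as_fmin]
  cases hfind : (List.range' 1 dist.length).find? (fun k =>
      (pvPerms k dist).any (fun p =>
        (List.range weaks.length).any (fun start =>
          pvCovers (weaks ++ weaks.map (fun w => w + n)) weaks.length start p))) with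
  | none =>
    have halt : solution_alt n weaks dist = (dist.length : Int) + 1 := by
      simp only [solution_alt]
      rw [hfind]
    have hnone := List.find?_eq_none.mp hfind
    have hval : fmin (pvG (weaks ++ weaks.map (fun v => v + n)) dist.length weaks.length)
        (dist.length + 1) (pvPairs dist.length weaks.length dist) = dist.length + 1 := by
      rcases fmin_cases (pvG (weaks ++ weaks.map (fun v => v + n)) dist.length weaks.length)
          (pvPairs dist.length weaks.length dist) (dist.length + 1) with h | ⟨q, hq, h⟩
      · exact h
      · by_cases hN : dist.length = 0
        · exfalso
          have hdist : dist = [] := List.length_eq_zero_iff.mp hN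
          have hwk : weaks = [] := hpre hdist
          rw [hwk] at hq
          simp [pvPairs] at hq
        · have hmem : dist.length ∈ List.range' 1 dist.length := by
            rw [List.mem_range'_1]; omega
          have hnp := hnone _ hmem
          have hle := fmin_le_init
            (pvG (weaks ++ weaks.map (fun v => v + n)) dist.length weaks.length)
            (pvPairs dist.length weaks.length dist) (dist.length + 1)
          have hgq : ¬ (pvG (weaks ++ weaks.map (fun v => v + n)) dist.length weaks.length q
              ≤ dist.length) := by
            intro hgle
            apply hnp
            have hexx := (exists_pair_iff (weaks ++ weaks.map (fun v => v + n)) weaks.length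
              dist dist.length (by omega) le_rfl).mp ⟨q, hq, hgle⟩
            obtain ⟨p, hp, st, hst, hc⟩ := hexx
            simp only [List.any_eq_true, List.mem_range]
            exact ⟨p, hp, st, hst, hc⟩
          omega
    rw [hval, halt]
    push_cast
    ring
  | some k =>
    have halt : solution_alt n weaks dist = (k : Int) := by
      simp only [solution_alt]
      rw [hfind]
    rw [List.find?_eq_some_iff_getElem] at hfind
    obtain ⟨hpk, i, hi, hik, hmin⟩ := hfind
    have hiN : i < dist.length := by simpa [List.length_range'] using hi
    have hk : k = 1 + i := by rw [← hik]; simp [List.getElem_range']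
    have hk1 : 1 ≤ k := by omega
    have hk2 : k ≤ dist.length := by omega
    have hex : ∃ p ∈ pvPerms k dist, ∃ st, st < weaks.length ∧
        pvCovers (weaks ++ weaks.map (fun v => v + n)) weaks.length st p = true := by
      simpa only [List.any_eq_true, List.mem_range] using hpk
    obtain ⟨q, hq, hgq⟩ := (exists_pair_iff (weaks ++ weaks.map (fun v => v + n))
      weaks.length dist k hk1 hk2).mpr hex
    have hub : fmin (pvG (weaks ++ weaks.map (fun v => v + n)) dist.length weaks.length)
        (dist.length + 1) (pvPairs dist.length weaks.length dist) ≤ k :=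
      le_trans (fmin_le_mem _ hq _) hgq
    have hlb : ∀ q' ∈ pvPairs dist.length weaks.length dist,
        k ≤ pvG (weaks ++ weaks.map (fun v => v + n)) dist.length weaks.length q' := by
      intro q' hq'
      by_contra hlt
      rw [not_le] at hlt
      have hq1 := pvG_pos (weaks ++ weaks.map (fun v => v + n)) dist.length weaks.length q'
      have hkk : 2 ≤ k := by omega
      have hj : k - 2 < i := by omega
      have hne := hmin (k - 2) hj
      have helem : (List.range' 1 dist.length)[k - 2]'(by simp [List.length_range']; omega)
          = k - 1 := by simp [List.getElem_range']; omega
      rw [helem] at hne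
      have hexx := (exists_pair_iff (weaks ++ weaks.map (fun v => v + n)) weaks.length dist
        (k - 1) (by omega) (by omega)).mp ⟨q', hq', by omega⟩
      obtain ⟨p, hp, st, hst, hc⟩ := hexx
      have hpos : (pvPerms (k - 1) dist).any (fun p =>
          (List.range weaks.length).any (fun start =>
            pvCovers (weaks ++ weaks.map (fun w => w + n)) weaks.length start p)) = true := by
        simp only [List.any_eq_true, List.mem_range]
        exact ⟨p, hp, st, hst, hc⟩
      rw [hpos] at hne
      simp at hne
    have hval : fmin (pvG (weaks ++ weaks.map (fun v => v + n)) dist.length weaks.length)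
        (dist.length + 1) (pvPairs dist.length weaks.length dist) = k := by
      refine le_antisymm hub ?_
      rcases fmin_cases (pvG (weaks ++ weaks.map (fun v => v + n)) dist.length weaks.length)
          (pvPairs dist.length weaks.length dist) (dist.length + 1) with h | ⟨q', hq', h⟩
      · omega
      · rw [h]; exact hlb q' hq'
    rw [hval, halt]
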